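-- pv_equiv track=rewrite | github.com/richardgaus/gen-ai-mental-health-review | src/runnable/data_cleaning/5_remove_non_generative_studies.py | count_model_types
-- ===== SOURCE A (Python) =====
-- def count_model_types(models_list: list[str], generative_models: list, non_generative_models: list) -> tuple[int, int]:
--     """
--     Count the number of generative and non-generative models in a list.
--
--     Args:
--         models_list (list[str]): List of model names
--         generative_models (list): List of generative model names from config
--         non_generative_models (list): List of non-generative model names from config
--
--     Returns:
--         tuple[int, int]: (num_generative, num_non_generative)
--     """
--     num_generative = 0
--     num_non_generative = 0
--
--     for model in models_list:
--         if model in generative_models: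
--             num_generative += 1
--         elif model in non_generative_models:
--             num_non_generative += 1
--         # Models not in either list are ignored (could be unknown/unclassified)
--
--     return num_generative, num_non_generative
-- ===== SOURCE B (Python) =====
-- def count_model_types(models_list: list[str], generative_models: list, non_generative_models: list) -> tuple[int, int]:
--     # Build a frequency table once, then sum multiplicities per distinct model
--     # against set-based membership (generative wins on overlap, like A's elif).
--     counts = {}
--     for model in models_list:
--         counts[model] = counts.get(model, 0) + 1
--     gen = set(generative_models)
--     non_gen = set(non_generative_models)
--     num_generative = sum(n for m, n in counts.items() if m in gen)
--     num_non_generative = sum(n for m, n in counts.items() if m in non_gen and m not in gen)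
--     return num_generative, num_non_generative
-- ===== Notes on version B (the rewrite author's own statement) =====
-- stated objective: faster
-- what changed: Replaces A's per-element if/elif scan of the two config lists with a frequency table over the distinct models plus set membership, summing multiplicities (generative excluded from the non-generative sum to preserve A's elif priority).
import Mathlib
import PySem

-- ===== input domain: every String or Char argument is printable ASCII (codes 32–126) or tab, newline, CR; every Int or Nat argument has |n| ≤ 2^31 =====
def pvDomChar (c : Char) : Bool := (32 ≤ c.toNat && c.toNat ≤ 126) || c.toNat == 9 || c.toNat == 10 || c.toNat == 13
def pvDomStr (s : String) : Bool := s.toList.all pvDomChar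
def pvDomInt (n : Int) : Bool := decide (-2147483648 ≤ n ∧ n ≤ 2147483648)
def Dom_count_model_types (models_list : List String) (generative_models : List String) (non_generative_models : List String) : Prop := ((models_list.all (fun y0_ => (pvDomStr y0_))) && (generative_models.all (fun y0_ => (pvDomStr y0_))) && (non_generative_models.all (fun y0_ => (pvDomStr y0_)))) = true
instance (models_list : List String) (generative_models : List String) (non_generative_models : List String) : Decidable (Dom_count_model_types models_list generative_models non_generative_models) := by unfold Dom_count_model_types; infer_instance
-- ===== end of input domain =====

-- B replaces A's per-element if/elif scan of the config lists with a frequency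
-- table over the distinct models plus set membership (objective: faster on
-- large config lists; constant-factor/asymptotic mechanism measured by the check).

-- ===== PORT A =====
def count_model_types (models_list : List String) (generative_models : List String) (non_generative_models : List String) : Int × Int :=
  models_list.foldl
    (fun (acc : Int × Int) model =>
      if generative_models.contains model then (acc.1 + 1, acc.2)
      else if non_generative_models.contains model then (acc.1, acc.2 + 1)
      else acc)
    (0, 0)

-- ===== PORT B =====
def count_model_types_alt (models_list : List String) (generative_models : List String) (non_generative_models : List String) : Int × Int :=
  let counts : PySem.Dict String Int :=
    models_list.foldl (fun d m => d.insert m (d.getD m 0 + 1)) PySem.Dict.empty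
  let gen : PySem.Set String := PySem.Set.ofList generative_models
  let non_gen : PySem.Set String := PySem.Set.ofList non_generative_models
  let num_generative : Int :=
    counts.items.foldl (fun s p => if PySem.Set.contains gen p.1 then s + p.2 else s) 0
  let num_non_generative : Int :=
    counts.items.foldl
      (fun s p => if PySem.Set.contains non_gen p.1 && !PySem.Set.contains gen p.1 then s + p.2 else s) 0
  (num_generative, num_non_generative)

-- ===== PRECONDITION & SPEC =====
def Spec_count_model_types (models_list : List String) (generative_models : List String) (non_generative_models : List String) (out : Int × Int) : Prop := out = count_model_types_alt models_list generative_models non_generative_models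
instance (models_list : List String) (generative_models : List String) (non_generative_models : List String) (out : Int × Int) : Decidable (Spec_count_model_types models_list generative_models non_generative_models out) := by unfold Spec_count_model_types; infer_instance

-- ===== CLAIM (what is proved, stated in full; the proofs are below) =====
def Claim_equal_count_model_types : Prop := ∀ (models_list : List String) (generative_models : List String) (non_generative_models : List String), Dom_count_model_types models_list generative_models non_generative_models → Spec_count_model_types models_list generative_models non_generative_models (count_model_types models_list generative_models non_generative_models)

-- ===== LEMMAS AND PROOFS =====

-- A's loop computes the two filtered counts of models_list.
theorem portA_eq_counts (ml gm ngm : List String) :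
    count_model_types ml gm ngm =
      ((ml.countP (fun m => gm.contains m) : Int),
       (ml.countP (fun m => !gm.contains m && ngm.contains m) : Int)) := by
  unfold count_model_types
  suffices h : ∀ (a b : Int),
      ml.foldl (fun (acc : Int × Int) model =>
        if gm.contains model then (acc.1 + 1, acc.2)
        else if ngm.contains model then (acc.1, acc.2 + 1)
        else acc) (a, b) =
      (a + (ml.countP (fun m => gm.contains m) : Int),
       b + (ml.countP (fun m => !gm.contains m && ngm.contains m) : Int)) by
    have h0 := h 0 0
    simpa using h0
  induction ml with
  | nil => intro a b; simp
  | cons x xs ih =>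
    intro a b
    rw [List.foldl_cons]
    by_cases hg : gm.contains x = true
    · rw [if_pos hg, ih]
      refine Prod.ext ?_ ?_ <;> simp only [List.countP_cons, hg, Bool.not_true,
        Bool.false_and, if_true, if_false] <;> push_cast <;> ring
    · have hg' : gm.contains x = false := by simp_all
      rw [if_neg hg]
      by_cases hn : ngm.contains x = true
      · rw [if_pos hn, ih]
        refine Prod.ext ?_ ?_ <;> simp only [List.countP_cons, hg', hn, Bool.not_false,
          Bool.true_and, if_true, if_false] <;> push_cast <;> ring
      · have hn' : ngm.contains x = false := by simp_all
        rw [if_neg hn, ih]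
        refine Prod.ext ?_ ?_ <;> simp only [List.countP_cons, hg', hn', Bool.not_false,
          Bool.true_and, Bool.and_false, if_false] <;> push_cast <;> ring

-- countP splits into the occurrences of k and the rest.
theorem countP_split (p : String → Bool) (k : String) (l : List String) :
    (l.countP p : Int) =
      (if p k then (l.count k : Int) else 0) + ((l.filter (fun y => !(y == k))).countP p : Int) := by
  induction l with
  | nil => simp
  | cons x xs ih =>
    by_cases hxk : x = k
    · subst hxk
      by_cases hp : p x = true <;>
        simp [List.countP_cons, List.count_cons, hp, ih] <;> omega
    · have hbk : (x == k) = false := by simp [hxk]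
      by_cases hpk : p k = true <;> by_cases hp : p x = true <;>
        simp [List.countP_cons, List.count_cons, hxk, hbk, hpk, hp, ih] <;> omega

-- summing counts of l over nodup keys covering l, filtered by p, gives countP p l.
theorem sum_counts_over_keys (p : String → Bool) :
    ∀ (keys : List String), keys.Nodup →
    ∀ (l : List String), (∀ x ∈ l, x ∈ keys) →
      ((keys.map (fun k => if p k then (l.count k : Int) else 0)).sum = (l.countP p : Int)) := by
  intro keys
  induction keys with
  | nil =>
    intro _ l hcov
    cases l with
    | nil => simp
    | cons x xs => exact absurd (hcov x (by simp)) (by simp)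
  | cons k rest ih =>
    intro hnd l hcov
    have hndr : rest.Nodup := (List.nodup_cons.mp hnd).2
    have hknr : k ∉ rest := (List.nodup_cons.mp hnd).1
    set l' := l.filter (fun y => !(y == k)) with hl'
    have hcov' : ∀ x ∈ l', x ∈ rest := by
      intro x hx
      have hx1 : x ∈ l := List.mem_of_mem_filter hx
      have hx2 : ¬ (x = k) := by
        have := List.of_mem_filter hx; simpa using this
      have := hcov x hx1
      simp at this
      rcases this with h | h
      · exact absurd h hx2
      · exact h
    have hmapeq : rest.map (fun k' => if p k' then (l.count k' : Int) else 0)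
        = rest.map (fun k' => if p k' then (l'.count k' : Int) else 0) := by
      apply List.map_congr_left
      intro x hx
      have hne : x ≠ k := by intro h; exact hknr (h ▸ hx)
      have : l'.count x = l.count x := by
        rw [hl', List.count_filter]
        simp [hne]
      rw [this]
    rw [List.map_cons, List.sum_cons, hmapeq, ih hndr l' hcov', ← countP_split]

-- B's sum-over-items with condition c equals countP c ml.
theorem portB_sum (ml : List String) (c : String → Bool) :
    ((PySem.Dict.counter ml (κ := String)).items.foldl
      (fun s p => if c p.1 then s + p.2 else s) 0) = (ml.countP c : Int) := by
  have hfun : (fun (s : Int) (p : String × Int) => if c p.1 then s + p.2 else s)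
      = (fun s p => s + (if c p.1 then p.2 else 0)) := by
    funext s p; split <;> simp
  rw [hfun,
    PySem.List.foldl_add (l := (PySem.Dict.counter ml (κ := String)).items)
      (a := 0) (g := fun p : String × Int => if c p.1 then p.2 else 0),
    PySem.Dict.items_counter, List.map_map]
  have hcomp : ((fun p : String × Int => if c p.1 then p.2 else 0) ∘ fun k => (k, (ml.count k : Int)))
      = (fun k => if c k then (ml.count k : Int) else 0) := by
    funext k; simp
  rw [hcomp]
  have := sum_counts_over_keys c (PySem.Set.ofList ml) (PySem.Set.nodup_ofList ml) ml
    (fun x hx => (PySem.Set.mem_ofList ml x).mpr hx)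
  simpa using this

-- Set membership on ofList is list membership.
theorem set_contains_ofList (xs : List String) (k : String) :
    PySem.Set.contains (PySem.Set.ofList xs) k = xs.contains k := by
  by_cases h : k ∈ xs
  · rw [(PySem.Set.contains_iff (PySem.Set.ofList xs) k).mpr ((PySem.Set.mem_ofList xs k).mpr h)]
    simp [h]
  · have : PySem.Set.contains (PySem.Set.ofList xs) k ≠ true := by
      intro hc
      exact h ((PySem.Set.mem_ofList xs k).mp ((PySem.Set.contains_iff (PySem.Set.ofList xs) k).mp hc))
    simp at this
    simp [this, h]

-- ===== VERDICT (by name: the statement is the Claim_ definition above) =====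
theorem count_model_types_spec : Claim_equal_count_model_types := by
  intro ml gm ngm _
  unfold Spec_count_model_types
  simp only [count_model_types_alt]
  rw [portA_eq_counts, PySem.Dict.foldl_insert_getD_add_one_eq_counter,
      portB_sum ml (fun k => PySem.Set.contains (PySem.Set.ofList gm) k),
      portB_sum ml (fun k => PySem.Set.contains (PySem.Set.ofList ngm) k
        && !PySem.Set.contains (PySem.Set.ofList gm) k)]
  have h1 : ml.countP (fun m => gm.contains m)
      = ml.countP (fun k => PySem.Set.contains (PySem.Set.ofList gm) k) :=
    List.countP_congr (fun x _ => by simp [set_contains_ofList])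
  have h2 : ml.countP (fun m => !gm.contains m && ngm.contains m)
      = ml.countP (fun k => PySem.Set.contains (PySem.Set.ofList ngm) k
          && !PySem.Set.contains (PySem.Set.ofList gm) k) :=
    List.countP_congr (fun x _ => by simp [set_contains_ofList, Bool.and_comm])
  rw [h1, h2]
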